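-- pv_equiv track=rewrite | github.com/Leo1003/NCTU_CS_Coding | 5307-CryptographyEngineering/Quiz3/quiz3.py | matrix_string
-- ===== SOURCE A (Python) =====
-- def matrix_string(matrix):
--     length = 0
--     s = ''
--     for m in matrix:
--         length = max(length, len(m))
--
--     for i in range(length):
--         for m in matrix:
--             if i < len(m):
--                 s += m[i]
--
--     return s
-- ===== SOURCE B (Python) =====
-- def matrix_string(matrix):
--     # Decorate every character with its (column, row) coordinates, sort by that
--     # key, and join: column-major order is exactly the lexicographic (column, row)
--     # order of the coordinates, so this equals A's double index loop.
--     cells = [(c, r, ch) for r, row in enumerate(matrix) for c, ch in enumerate(row)]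
--     cells.sort(key=lambda t: (t[0], t[1]))
--     return ''.join(ch for _, _, ch in cells)
-- ===== Notes on version B (the rewrite author's own statement) =====
-- stated objective: alternative
-- what changed: Replaced the max-length computation and the index-based double loop by decorate-sort-undecorate: tag every character with its (column,row) coordinates, sort by that key, and join; column-major order is the lexicographic (column,row) order.
import Mathlib
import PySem

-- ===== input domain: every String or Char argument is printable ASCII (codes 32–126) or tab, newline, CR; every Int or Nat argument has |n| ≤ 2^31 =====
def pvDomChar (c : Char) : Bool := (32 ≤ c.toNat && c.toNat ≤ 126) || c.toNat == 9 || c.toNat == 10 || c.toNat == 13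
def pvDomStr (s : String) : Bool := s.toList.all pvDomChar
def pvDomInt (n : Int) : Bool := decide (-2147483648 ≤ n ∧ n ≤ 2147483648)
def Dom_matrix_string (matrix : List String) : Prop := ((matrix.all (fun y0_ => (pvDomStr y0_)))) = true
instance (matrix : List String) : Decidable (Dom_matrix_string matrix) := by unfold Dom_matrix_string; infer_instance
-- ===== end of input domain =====

-- B replaces A's max-length computation and index-based double loop by
-- decorate-sort-undecorate: tag every character with its (column, row)
-- coordinates, sort by that key, and join (an alternative algorithm, not faster).

-- ===== PORT A =====
-- literal port: compute the max length, then for i in range(length), append m[i] for each row with i < len(m)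
def matrix_string (matrix : List String) : String :=
  String.ofList
    ((PySem.List.pyRange 0 (matrix.foldl (fun l m => max l (PySem.Str.len m)) 0) 1).foldl
      (fun s i => matrix.foldl (fun s m =>
        if i < PySem.Str.len m then s ++ ((PySem.Str.pyGet? m i).elim [] (fun c => [c])) else s) s)
      [])

-- ===== PORT B =====
-- port of Source B: cells = [(c, r, ch) for r, row in enumerate(matrix) for c, ch in enumerate(row)]
def pvCells (matrix : List String) : List (Int × Int × Char) :=
  (PySem.List.enumerate matrix 0).flatMap (fun rm =>
    (PySem.List.enumerate rm.2.toList 0).map (fun ct => (ct.1, rm.1, ct.2)))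

-- the sort key of Source B: lambda t: (t[0], t[1]); Python's tuple comparison is the
-- lexicographic order, i.e. the order of Lex (Int × Int)
def pvKey (t : Int × Int × Char) : Lex (Int × Int) := toLex (t.1, t.2.1)

-- cells.sort(key=…) then ''.join(ch for _, _, ch in cells)
def matrix_string_alt (matrix : List String) : String :=
  String.ofList ((PySem.List.sorted (pvCells matrix) pvKey false).map (fun t => t.2.2))

-- ===== PRECONDITION & SPEC =====
def Spec_matrix_string (matrix : List String) (out : String) : Prop := out = matrix_string_alt matrix
instance (matrix : List String) (out : String) : Decidable (Spec_matrix_string matrix out) := by unfold Spec_matrix_string; infer_instance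

-- ===== CLAIM (what is proved, stated in full; the proofs are below) =====
def Claim_equal_matrix_string : Prop := ∀ (matrix : List String), Dom_matrix_string matrix → Spec_matrix_string matrix (matrix_string matrix)

-- ===== LEMMAS AND PROOFS =====

-- the max row length, as a Nat
def pvMaxLen (rows : List (List Char)) : Nat := rows.foldl (fun l m => max l m.length) 0

theorem pvMaxLen_acc (rows : List (List Char)) (a : Nat) :
    rows.foldl (fun l m => max l m.length) a = max a (pvMaxLen rows) := by
  induction rows generalizing a with
  | nil => simp [pvMaxLen]
  | cons m rs ih =>
    simp only [pvMaxLen, List.foldl_cons]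
    rw [ih (max a m.length), ih (max 0 m.length)]
    omega

theorem pvLe_pvMaxLen (rows : List (List Char)) (m : List Char) (hm : m ∈ rows) :
    m.length ≤ pvMaxLen rows := by
  induction rows with
  | nil => simp at hm
  | cons x rs ih =>
    simp only [pvMaxLen, List.foldl_cons]
    rw [pvMaxLen_acc]
    rcases List.mem_cons.mp hm with h | h
    · subst h; omega
    · have := ih h; omega

-- A's foldl-of-max over Int equals the Nat max, cast
theorem pvLen_fold_cast (matrix : List String) :
    matrix.foldl (fun l m => max l (PySem.Str.len m)) 0
      = ((pvMaxLen (matrix.map String.toList) : Nat) : Int) := by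
  suffices h : ∀ (a : Nat), matrix.foldl (fun l m => max l (PySem.Str.len m)) (a : Int)
      = (((matrix.map String.toList).foldl (fun l m => max l m.length) a : Nat) : Int) by
    simpa [pvMaxLen] using h 0
  induction matrix with
  | nil => intro a; simp
  | cons m rs ih =>
    intro a
    simp only [List.foldl_cons, List.map_cons, PySem.Str.len_eq]
    rw [show max (a : Int) ((m.toList.length : Nat) : Int)
        = ((max a m.toList.length : Nat) : Int) from by push_cast; rfl]
    exact ih (max a m.toList.length)

-- column k of the rows
def pvCol (rows : List (List Char)) (k : Nat) : List Char :=
  rows.filterMap (fun m => m[k]?)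

-- A's inner loop over matrix appends exactly column k
theorem pvInner_eq (matrix : List String) (k : Nat) (s : List Char) :
    matrix.foldl (fun s m =>
        if ((k : Nat) : Int) < PySem.Str.len m then
          s ++ ((PySem.Str.pyGet? m ((k : Nat) : Int)).elim [] (fun c => [c]))
        else s) s
      = s ++ pvCol (matrix.map String.toList) k := by
  induction matrix generalizing s with
  | nil => simp [pvCol]
  | cons m rs ih =>
    simp only [List.foldl_cons, List.map_cons, pvCol, List.filterMap_cons]
    by_cases hk : k < m.toList.length
    · have hlt : ((k : Nat) : Int) < PySem.Str.len m := by
        rw [PySem.Str.len_eq]; exact_mod_cast hk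
      have hget : m.toList[k]? = some m.toList[k] := List.getElem?_eq_getElem hk
      rw [if_pos hlt, ih, PySem.Str.pyGet?_natCast, hget]
      simp [pvCol, List.append_assoc]
    · have hge : ¬ ((k : Nat) : Int) < PySem.Str.len m := by
        rw [PySem.Str.len_eq]; exact_mod_cast hk
      have hget : m.toList[k]? = none := List.getElem?_eq_none (by omega)
      rw [if_neg hge, ih, hget]
      simp [pvCol]

-- A's outer loop over a list of Nat indices accumulates the flatMap of the columns
theorem pvFold_eq (matrix : List String) (L : List Nat) :
    ∀ s : List Char, L.foldl (fun s k => matrix.foldl (fun s m =>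
        if ((k : Nat) : Int) < PySem.Str.len m then
          s ++ ((PySem.Str.pyGet? m ((k : Nat) : Int)).elim [] (fun c => [c]))
        else s) s) s
      = s ++ L.flatMap (pvCol (matrix.map String.toList)) := by
  induction L with
  | nil => intro s; simp
  | cons k L ih =>
    intro s
    rw [List.foldl_cons, pvInner_eq, ih, List.flatMap_cons, List.append_assoc]

-- the column-major rearrangement of the cells, named by filtering on the column index
def pvTarget (N : Nat) (l : List (Int × Int × Char)) : List (Int × Int × Char) :=
  (List.range N).flatMap (fun i => l.filter (fun t => t.1 == ((i : Nat) : Int)))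

-- every cell's column index is in [0, max length)
theorem pvCells_bound (matrix : List String) (t : Int × Int × Char) (ht : t ∈ pvCells matrix) :
    0 ≤ t.1 ∧ t.1 < ((pvMaxLen (matrix.map String.toList) : Nat) : Int) := by
  simp only [pvCells, List.mem_flatMap, List.mem_map] at ht
  obtain ⟨rm, hrm, ct, hct, rfl⟩ := ht
  have h1 : ct.1 ∈ (PySem.List.enumerate rm.2.toList 0).map (fun x => x.1) :=
    List.mem_map_of_mem hct
  rw [PySem.List.map_fst_enumerate, PySem.List.mem_pyRange_one] at h1
  have h2 : rm.2 ∈ (PySem.List.enumerate matrix 0).map (fun x => x.2) :=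
    List.mem_map_of_mem hrm
  rw [PySem.List.map_snd_enumerate] at h2
  have h3 : rm.2.toList.length ≤ pvMaxLen (matrix.map String.toList) :=
    pvLe_pvMaxLen _ _ (List.mem_map_of_mem h2)
  obtain ⟨hl, hr⟩ := h1
  refine ⟨hl, ?_⟩
  have : (rm.2.toList.length : Int) ≤ ((pvMaxLen (matrix.map String.toList) : Nat) : Int) := by
    exact_mod_cast h3
  omega

-- grouping a list into its key-blocks is a permutation of the list
theorem pvTarget_perm (N : Nat) :
    ∀ l : List (Int × Int × Char), (∀ x ∈ l, 0 ≤ x.1 ∧ x.1 < (N : Int)) →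
    (pvTarget N l).Perm l := by
  induction N with
  | zero =>
    intro l h
    have : l = [] := by
      cases l with
      | nil => rfl
      | cons a t => exact absurd (h a (by simp)) (by omega)
    subst this
    simp [pvTarget]
  | succ N ih =>
    intro l h
    have hsplit : pvTarget (N + 1) l
        = pvTarget N l ++ l.filter (fun t => t.1 == ((N : Nat) : Int)) := by
      simp [pvTarget, List.range_succ]
    set l' := l.filter (fun t => !(t.1 == ((N : Nat) : Int))) with hl'
    have hblocks : pvTarget N l = pvTarget N l' := by
      unfold pvTarget
      refine List.flatMap_congr (fun i hi => ?_)
      rw [hl', List.filter_filter]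
      refine (List.filter_congr (fun x _ => ?_)).symm
      have hi' : i < N := List.mem_range.mp hi
      by_cases hx : x.1 = (i : Int)
      · have hne : ¬ i = N := by omega
        simp [hx, hne]
      · simp [hx]
    have hperm' : (pvTarget N l').Perm l' := by
      refine ih l' (fun x hx => ?_)
      obtain ⟨hmem, hne⟩ := List.mem_filter.mp hx
      have := h x hmem
      have hne' : ¬ x.1 = ((N : Nat) : Int) := by
        intro hc; simp [hc] at hne
      constructor
      · exact this.1
      · omega
    rw [hsplit, hblocks]
    have hfp : (l' ++ l.filter (fun t => t.1 == ((N : Nat) : Int))).Perm l := by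
      have := List.filter_append_perm (fun t : Int × Int × Char => !(t.1 == ((N : Nat) : Int))) l
      simpa using this
    exact (hperm'.append_right _).trans hfp

-- the key order inside and across the blocks: pvTarget is strictly key-increasing
theorem pvEnum_pairwise_fst {α : Type} (xs : List α) (s : Int) :
    (PySem.List.enumerate xs s).Pairwise (fun a b => a.1 < b.1) := by
  have h := PySem.List.pairwise_lt_pyRange_one s (s + xs.length)
  rw [← PySem.List.map_fst_enumerate xs s] at h
  exact List.pairwise_map.mp h

-- the cells are strictly increasing in the (row, column) lexicographic order
theorem pvCells_pairwise (matrix : List String) :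
    (pvCells matrix).Pairwise
      (fun a b => a.2.1 < b.2.1 ∨ (a.2.1 = b.2.1 ∧ a.1 < b.1)) := by
  unfold pvCells
  rw [List.pairwise_flatMap]
  constructor
  · intro rm _
    rw [List.pairwise_map]
    refine (pvEnum_pairwise_fst rm.2.toList 0).imp ?_
    intro a b hab
    exact Or.inr ⟨rfl, hab⟩
  · refine (pvEnum_pairwise_fst matrix 0).imp_of_mem ?_
    intro rm1 rm2 _ _ h12 x hx y hy
    simp only [List.mem_map] at hx hy
    obtain ⟨ct1, _, rfl⟩ := hx
    obtain ⟨ct2, _, rfl⟩ := hy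
    exact Or.inl h12

theorem pvTarget_pairwise (matrix : List String) (N : Nat) :
    (pvTarget N (pvCells matrix)).Pairwise (fun a b => pvKey a < pvKey b) := by
  unfold pvTarget
  rw [List.pairwise_flatMap]
  constructor
  · intro i _
    refine (List.Pairwise.sublist List.filter_sublist (pvCells_pairwise matrix)).imp_of_mem ?_
    intro a b ha hb hab
    have ha' := (List.mem_filter.mp ha).2
    have hb' := (List.mem_filter.mp hb).2
    have ha1 : a.1 = ((i : Nat) : Int) := by simpa using ha'
    have hb1 : b.1 = ((i : Nat) : Int) := by simpa using hb'
    rcases hab with h | ⟨_, hc⟩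
    · simp [pvKey, Prod.Lex.lt_iff, ha1, hb1, h]
    · exact absurd hc (by rw [ha1, hb1]; omega)
  · refine List.pairwise_lt_range.imp_of_mem ?_
    intro i j _ _ hij x hx y hy
    have hx1 : x.1 = ((i : Nat) : Int) := by simpa using (List.mem_filter.mp hx).2
    have hy1 : y.1 = ((j : Nat) : Int) := by simpa using (List.mem_filter.mp hy).2
    have hij' : ((i : Nat) : Int) < ((j : Nat) : Int) := by exact_mod_cast hij
    simp [pvKey, Prod.Lex.lt_iff, hx1, hy1, hij']

-- one row's cells, filtered to column i, carry exactly the character row[i] (if any)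
theorem pvRow_filter (cs : List Char) (r : Int) (i : Nat) :
    ∀ s : Nat,
    (((PySem.List.enumerate cs ((s : Nat) : Int)).map (fun ct => (ct.1, r, ct.2))).filter
        (fun t => t.1 == ((i : Nat) : Int))).map (fun t => t.2.2)
      = if s ≤ i then (cs[(i - s)]?).toList else [] := by
  induction cs with
  | nil => intro s; simp [PySem.List.enumerate_nil]
  | cons a cs ih =>
    intro s
    rw [PySem.List.enumerate_cons]
    simp only [List.map_cons, List.filter_cons]
    have h2 : ((((s : Nat) : Int) + 1) = (((s + 1 : Nat) : Nat) : Int)) := by push_cast; ring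
    by_cases hsi : s = i
    · subst hsi
      have h1 : (((s : Nat) : Int) == ((s : Nat) : Int)) = true := by simp
      rw [if_pos h1, List.map_cons, h2, ih (s + 1),
        if_neg (by omega : ¬ s + 1 ≤ s), if_pos (le_refl s)]
      simp
    · have h1 : (((s : Nat) : Int) == ((i : Nat) : Int)) = false := by
        simp; omega
      rw [h2]
      simp only [h1, Bool.false_eq_true, if_false]
      rw [ih (s + 1)]
      by_cases hle : s ≤ i
      · have hlt : s + 1 ≤ i := by omega
        rw [if_pos hle, if_pos hlt]
        have hd : i - s = (i - (s + 1)) + 1 := by omega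
        rw [hd, List.getElem?_cons_succ]
      · rw [if_neg hle, if_neg (by omega)]

-- the cells of column i, stripped of their coordinates, are A's column i
theorem pvFilter_col (matrix : List String) (i : Nat) :
    ((pvCells matrix).filter (fun t => t.1 == ((i : Nat) : Int))).map (fun t => t.2.2)
      = pvCol (matrix.map String.toList) i := by
  unfold pvCells
  rw [List.filter_flatMap, List.map_flatMap]
  have hrow : ∀ rm : Int × String,
      (((PySem.List.enumerate rm.2.toList 0).map (fun ct => (ct.1, rm.1, ct.2))).filter
          (fun t => t.1 == ((i : Nat) : Int))).map (fun t => t.2.2)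
        = (rm.2.toList[i]?).toList := by
    intro rm
    have := pvRow_filter rm.2.toList rm.1 i 0
    simpa using this
  calc (PySem.List.enumerate matrix 0).flatMap (fun rm =>
          (((PySem.List.enumerate rm.2.toList 0).map (fun ct => (ct.1, rm.1, ct.2))).filter
            (fun t => t.1 == ((i : Nat) : Int))).map (fun t => t.2.2))
      = (PySem.List.enumerate matrix 0).flatMap (fun rm => (rm.2.toList[i]?).toList) := by
        exact List.flatMap_congr (fun rm _ => hrow rm)
    _ = matrix.flatMap (fun m => (m.toList[i]?).toList) := by
        rw [← List.flatMap_map (fun x : Int × String => x.2)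
          (fun m : String => (m.toList[i]?).toList) (PySem.List.enumerate matrix 0),
          PySem.List.map_snd_enumerate]
    _ = pvCol (matrix.map String.toList) i := by
        rw [pvCol, List.filterMap_map,
          ← List.filterMap_eq_flatMap_toList (fun m : String => m.toList[i]?) matrix]
        rfl

-- ===== VERDICT (by name: the statement is the Claim_ definition above) =====
theorem matrix_string_spec : Claim_equal_matrix_string := by
  intro matrix _
  unfold Spec_matrix_string matrix_string matrix_string_alt
  set N := pvMaxLen (matrix.map String.toList) with hN
  have hsorted : PySem.List.sorted (pvCells matrix) pvKey false = pvTarget N (pvCells matrix) :=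
    PySem.List.sorted_eq_of_perm_of_pairwise_lt _ _ _
      (pvTarget_perm N (pvCells matrix) (fun x hx => pvCells_bound matrix x hx))
      (pvTarget_pairwise matrix N)
  rw [hsorted]
  congr 1
  rw [pvLen_fold_cast, ← hN, PySem.List.pyRange_zero_natCast, List.foldl_map]
  rw [pvFold_eq matrix (List.range N) [], List.nil_append]
  unfold pvTarget
  rw [List.map_flatMap]
  exact (List.flatMap_congr (fun i _ => pvFilter_col matrix i)).symm
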